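-- pv_equiv track=rewrite | github.com/erturkmemmedli/Leet-Code-Solutions | 0454_fourSumCount.py | twoSumCount
-- ===== SOURCE A (Python) =====
-- from collections import defaultdict
-- from collections import defaultdict
-- from collections import defaultdict
--
-- def twoSumCount(nums1, nums2, target):
--     hashmap = defaultdict(int)
--     result = 0
--     for num in nums1:
--         hashmap[target - num] += 1
--     for num in nums2:
--         if num in hashmap:
--             result += hashmap[num]
--     return result
-- ===== SOURCE B (Python) =====
-- def twoSumCount(nums1, nums2, target):
--     a = sorted(nums1)
--     b = sorted(nums2, reverse=True)
--     i, j = 0, 0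
--     result = 0
--     while i < len(a) and j < len(b):
--         s = a[i] + b[j]
--         if s < target:
--             i += 1
--         elif s > target:
--             j += 1
--         else:
--             ci = i
--             while ci < len(a) and a[ci] == a[i]:
--                 ci += 1
--             cj = j
--             while cj < len(b) and b[cj] == b[j]:
--                 cj += 1
--             result += (ci - i) * (cj - j)
--             i, j = ci, cj
--     return result
-- ===== Notes on version B (the rewrite author's own statement) =====
-- stated objective: alternative
-- what changed: Replaced A's hash-map of complement counts plus lookup pass with sorting both lists and a two-pointer sweep that multiplies the lengths of equal-value runs when a matching sum is found.
import Mathlib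
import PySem

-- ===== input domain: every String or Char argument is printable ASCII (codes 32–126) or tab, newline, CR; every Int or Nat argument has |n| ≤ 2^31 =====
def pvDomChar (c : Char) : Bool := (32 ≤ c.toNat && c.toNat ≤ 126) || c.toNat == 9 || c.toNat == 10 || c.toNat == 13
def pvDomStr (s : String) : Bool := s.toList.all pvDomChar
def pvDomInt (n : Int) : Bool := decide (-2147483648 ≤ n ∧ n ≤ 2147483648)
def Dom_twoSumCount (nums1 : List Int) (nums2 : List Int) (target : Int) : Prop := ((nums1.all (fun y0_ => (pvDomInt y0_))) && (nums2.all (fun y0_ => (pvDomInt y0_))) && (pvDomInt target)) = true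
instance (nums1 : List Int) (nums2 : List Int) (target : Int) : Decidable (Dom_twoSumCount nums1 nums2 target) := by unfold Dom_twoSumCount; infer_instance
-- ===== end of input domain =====

-- B replaces A's hash-map counting with sort + a two-pointer sweep that multiplies equal-run
-- lengths (objective: alternative algorithm, same result; neither mutates its arguments).

-- ===== PORT A =====
-- literal port of A: build defaultdict counts of (target - num) over nums1, then sum lookups over nums2
def twoSumCount (nums1 : List Int) (nums2 : List Int) (target : Int) : Int :=
  let hashmap : PySem.Dict Int Int :=
    nums1.foldl (fun d num => d.modify (target - num) 0 (· + 1)) PySem.Dict.empty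
  nums2.foldl (fun result num =>
    if hashmap.contains num then result + hashmap.getD num 0 else result) 0

-- ===== PORT B =====
-- helper for B: first index ≥ i whose value differs from v (Python's inner run-scan while
-- loop; the fuel argument only encodes termination — xs.length - i steps always suffice)
def runEnd (fuel : Nat) (xs : List Int) (v : Int) (i : Nat) : Nat :=
  match fuel with
  | 0 => i
  | fuel + 1 =>
    if h : i < xs.length then
      if xs[i] = v then runEnd fuel xs v (i + 1) else i
    else i

-- B's main while loop: two pointers i (into ascending a) and j (into descending b);
-- fuel only encodes termination (every iteration moves a pointer forward)
def goIdx (fuel : Nat) (a b : List Int) (t : Int) (i j : Nat) (result : Int) : Int :=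
  match fuel with
  | 0 => result
  | fuel + 1 =>
    if h : i < a.length ∧ j < b.length then
      let s : Int := a[i]'h.1 + b[j]'h.2
      if s < t then goIdx fuel a b t (i + 1) j result
      else if t < s then goIdx fuel a b t i (j + 1) result
      else
        let ci := runEnd (a.length - i) a (a[i]'h.1) i
        let cj := runEnd (b.length - j) b (b[j]'h.2) j
        goIdx fuel a b t ci cj (result + ((ci - i) * (cj - j) : Nat))
    else result

def twoSumCount_alt (nums1 : List Int) (nums2 : List Int) (target : Int) : Int :=
  let a := PySem.List.sorted nums1 (fun x => x) false
  let b := PySem.List.sorted nums2 (fun x => x) true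
  goIdx (a.length + b.length + 1) a b target 0 0 0

-- ===== PRECONDITION & SPEC =====
def Spec_twoSumCount (nums1 : List Int) (nums2 : List Int) (target : Int) (out : Int) : Prop := out = twoSumCount_alt nums1 nums2 target
instance (nums1 : List Int) (nums2 : List Int) (target : Int) (out : Int) : Decidable (Spec_twoSumCount nums1 nums2 target out) := by unfold Spec_twoSumCount; infer_instance

-- ===== CLAIM (what is proved, stated in full; the proofs are below) =====
def Claim_equal_twoSumCount : Prop := ∀ (nums1 : List Int) (nums2 : List Int) (target : Int), Dom_twoSumCount nums1 nums2 target → Spec_twoSumCount nums1 nums2 target (twoSumCount nums1 nums2 target)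

-- ===== LEMMAS AND PROOFS =====

-- the common specification: number of pairs (x, y) ∈ a × b with x + y = t
def pairCount (a b : List Int) (t : Int) : Int :=
  (b.map (fun y => ((a.count (t - y) : Nat) : Int))).sum

-- length of the initial run of v's
def runlen : List Int → Int → Nat
  | [], _ => 0
  | x :: xs, v => if x = v then runlen xs v + 1 else 0

theorem runEnd_eq (fuel : Nat) (xs : List Int) (v : Int) (i : Nat)
    (hi : i ≤ xs.length) (hfuel : xs.length - i ≤ fuel) :
    runEnd fuel xs v i = i + runlen (xs.drop i) v := by
  induction fuel generalizing i with
  | zero =>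
    have hix : i = xs.length := by omega
    have hd : xs.drop i = [] := List.drop_eq_nil_of_le (by omega)
    simp [runEnd, hd, runlen]
  | succ fuel ih =>
    rw [runEnd]
    by_cases h : i < xs.length
    · rw [dif_pos h, List.drop_eq_getElem_cons h]
      by_cases hv : xs[i] = v
      · rw [if_pos hv, ih (i + 1) (by omega) (by omega)]
        simp [runlen, hv]
        omega
      · rw [if_neg hv]
        simp [runlen, hv]
    · rw [dif_neg h]
      have hd : xs.drop i = [] := List.drop_eq_nil_of_le (by omega)
      simp [hd, runlen]

theorem runlen_le_length (l : List Int) (v : Int) : runlen l v ≤ l.length := by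
  induction l with
  | nil => simp [runlen]
  | cons x xs ih => simp only [runlen, List.length_cons]; split <;> omega

theorem take_runlen (l : List Int) (v : Int) :
    l.take (runlen l v) = List.replicate (runlen l v) v := by
  induction l with
  | nil => simp [runlen]
  | cons x xs ih =>
    by_cases hx : x = v
    · subst hx; simp [runlen, List.replicate_succ, ih]
    · simp [runlen, hx]

theorem runlen_getElem_ne (l : List Int) (v : Int) (h : runlen l v < l.length) :
    l[runlen l v] ≠ v := by
  induction l with
  | nil => simp at h
  | cons x xs ih =>
    by_cases hx : x = v
    · subst hx
      have hr : runlen (x :: xs) x = runlen xs x + 1 := by simp [runlen]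
      simp only [hr] at h ⊢
      simp only [List.getElem_cons_succ]
      exact ih (by simpa using h)
    · simp [runlen, hx]

theorem pairCount_nil_left (b : List Int) (t : Int) : pairCount [] b t = 0 := by
  simp [pairCount]

theorem pairCount_cons_right (a : List Int) (y : Int) (b : List Int) (t : Int) :
    pairCount a (y :: b) t = ((a.count (t - y) : Nat) : Int) + pairCount a b t := by
  simp [pairCount]

theorem pairCount_append_right (a u v : List Int) (t : Int) :
    pairCount a (u ++ v) t = pairCount a u t + pairCount a v t := by
  simp [pairCount]

theorem pairCount_cons_left (x : Int) (a b : List Int) (t : Int) :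
    pairCount (x :: a) b t = ((b.countP (fun y => x + y == t) : Nat) : Int) + pairCount a b t := by
  induction b with
  | nil => simp [pairCount]
  | cons y b ih =>
    rw [pairCount_cons_right, pairCount_cons_right, ih]
    have hc : (x :: a).count (t - y) = a.count (t - y) + if x == t - y then 1 else 0 :=
      List.count_cons
    have hp : (y :: b).countP (fun z => x + z == t)
        = b.countP (fun z => x + z == t) + if x + y == t then 1 else 0 := by
      rw [List.countP_cons]
    rw [hc, hp]
    by_cases hxy : x + y = t
    · have hx : x = t - y := by omega
      simp [hx]
      ring
    · have hx : x ≠ t - y := by omega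
      simp [(by simp [hxy] : (x + y == t) = false), hx]
      ring

theorem pairCount_append_left (u v b : List Int) (t : Int) :
    pairCount (u ++ v) b t = pairCount u b t + pairCount v b t := by
  simp only [pairCount, List.count_append]
  push_cast
  rw [← PySem.List.sum_map_add_int]

theorem pairCount_eq_zero (a b : List Int) (t : Int)
    (h : ∀ x ∈ a, ∀ y ∈ b, x + y ≠ t) : pairCount a b t = 0 := by
  induction b with
  | nil => simp [pairCount]
  | cons y b ih =>
    rw [pairCount_cons_right]
    have hc : a.count (t - y) = 0 := by
      apply List.count_eq_zero.mpr
      intro hmem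
      exact h _ hmem y (List.mem_cons_self) (by omega)
    rw [hc, ih (fun x hx z hz => h x hx z (List.mem_cons_of_mem _ hz))]
    simp

theorem pairCount_replicate (m n : Nat) (x y t : Int) (hxy : x + y = t) :
    pairCount (List.replicate m x) (List.replicate n y) t = (m * n : Nat) := by
  have hx : t - y = x := by omega
  simp [pairCount, List.map_replicate, hx, List.count_replicate_self]
  ring

theorem pairCount_perm (a a' b b' : List Int) (t : Int) (ha : a.Perm a') (hb : b.Perm b') :
    pairCount a b t = pairCount a' b' t := by
  unfold pairCount
  rw [List.Perm.sum_eq (hb.map _)]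
  congr 1
  apply List.map_congr_left
  intro y _
  rw [List.Perm.count ha]

-- elements of a sorted (asc) list beyond the initial run of the head are strictly greater
theorem drop_runlen_gt (l : List Int) (hp : l.Pairwise (· ≤ ·)) (x : Int) (rest : List Int)
    (hl : l = x :: rest) : ∀ z ∈ l.drop (runlen l x), x < z := by
  intro z hz
  subst hl
  set l := x :: rest with hl
  set k := runlen l x with hk
  have hk1 : 1 ≤ k := by rw [hk, hl]; simp [runlen]
  have hkle : k ≤ l.length := runlen_le_length l x
  by_cases hkl : k < l.length
  · obtain ⟨m, hm, rfl⟩ := List.mem_iff_getElem.mp hz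
    rw [List.getElem_drop]
    have hgp := List.pairwise_iff_getElem.mp hp
    have hne := runlen_getElem_ne l x hkl
    have hmlen : k + m < l.length := by
      simp only [List.length_drop] at hm; omega
    have hx0 : l[0]'(by omega) = x := by simp [hl]
    have h1 : l[0]'(by omega) ≤ l[k] := hgp 0 k (by omega) (by omega) (by omega)
    have h2 : l[k]'(by omega) ≤ l[k + m]'(by omega) := by
      rcases Nat.eq_zero_or_pos m with rfl | hm0
      · simp
      · exact hgp k (k + m) (by omega) (by omega) (by omega)
    have hlt : x < l[k]'(by omega) := lt_of_le_of_ne (hx0 ▸ h1) (Ne.symm hne)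
    exact lt_of_lt_of_le hlt h2
  · have : l.drop k = [] := List.drop_eq_nil_of_le (by omega)
    rw [this] at hz
    simp at hz

theorem drop_runlen_lt (l : List Int) (hp : l.Pairwise (fun p q => q ≤ p)) (y : Int)
    (rest : List Int) (hl : l = y :: rest) : ∀ z ∈ l.drop (runlen l y), z < y := by
  intro z hz
  subst hl
  set l := y :: rest with hl
  set k := runlen l y with hk
  have hk1 : 1 ≤ k := by rw [hk, hl]; simp [runlen]
  have hkle : k ≤ l.length := runlen_le_length l y
  by_cases hkl : k < l.length
  · obtain ⟨m, hm, rfl⟩ := List.mem_iff_getElem.mp hz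
    rw [List.getElem_drop]
    have hgp := List.pairwise_iff_getElem.mp hp
    have hne := runlen_getElem_ne l y hkl
    have hmlen : k + m < l.length := by
      simp only [List.length_drop] at hm; omega
    have hy0 : l[0]'(by omega) = y := by simp [hl]
    have h1 : l[k]'(by omega) ≤ l[0]'(by omega) := hgp 0 k (by omega) (by omega) (by omega)
    have h2 : l[k + m]'(by omega) ≤ l[k]'(by omega) := by
      rcases Nat.eq_zero_or_pos m with rfl | hm0
      · simp
      · exact hgp k (k + m) (by omega) (by omega) (by omega)
    have hlt : l[k]'(by omega) < y := lt_of_le_of_ne (hy0 ▸ h1) hne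
    exact lt_of_le_of_lt h2 hlt
  · have : l.drop k = [] := List.drop_eq_nil_of_le (by omega)
    rw [this] at hz
    simp at hz

theorem goIdx_eq (fuel : Nat) (a b : List Int) (t : Int)
    (ha : a.Pairwise (· ≤ ·)) (hb : b.Pairwise (fun p q => q ≤ p))
    (i j : Nat) (r : Int) (hfuel : (a.length - i) + (b.length - j) < fuel) :
    goIdx fuel a b t i j r = r + pairCount (a.drop i) (b.drop j) t := by
  induction fuel generalizing i j r with
  | zero => omega
  | succ fuel ih =>
    rw [goIdx]
    by_cases h : i < a.length ∧ j < b.length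
    · rw [dif_pos h]
      have hda : a.drop i = a[i]'h.1 :: a.drop (i + 1) := List.drop_eq_getElem_cons h.1
      have hdb : b.drop j = b[j]'h.2 :: b.drop (j + 1) := List.drop_eq_getElem_cons h.2
      have hpa : (a.drop i).Pairwise (· ≤ ·) := ha.sublist (List.drop_sublist _ _)
      have hpb : (b.drop j).Pairwise (fun p q => q ≤ p) := hb.sublist (List.drop_sublist _ _)
      by_cases hs : a[i]'h.1 + b[j]'h.2 < t
      · rw [if_pos hs, ih (i + 1) j r (by omega)]
        rw [hda, pairCount_cons_left]
        have hzero : (b.drop j).countP (fun y => a[i]'h.1 + y == t) = 0 := by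
          apply List.countP_eq_zero.mpr
          intro y hy
          rw [hdb] at hy
          have hyb : y ≤ b[j]'h.2 := by
            rcases List.mem_cons.mp hy with rfl | hmem
            · exact le_refl _
            · rw [hdb] at hpb
              exact (List.pairwise_cons.mp hpb).1 y hmem
          simp only [beq_iff_eq]
          omega
        rw [hzero]
        simp
      · rw [if_neg hs]
        by_cases hs2 : t < a[i]'h.1 + b[j]'h.2
        · rw [if_pos hs2, ih i (j + 1) r (by omega)]
          rw [hdb, pairCount_cons_right]
          have hzero : (a.drop i).count (t - b[j]'h.2) = 0 := by
            apply List.count_eq_zero.mpr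
            intro hmem
            rw [hda] at hmem hpa
            rcases List.mem_cons.mp hmem with heq | hmem2
            · omega
            · have := (List.pairwise_cons.mp hpa).1 _ hmem2
              omega
          rw [hzero]
          simp
        · rw [if_neg hs2]
          have heq : a[i]'h.1 + b[j]'h.2 = t := by omega
          set m := runlen (a.drop i) (a[i]'h.1) with hm
          set n := runlen (b.drop j) (b[j]'h.2) with hn
          have hm1 : 1 ≤ m := by rw [hm, hda]; simp [runlen]
          have hn1 : 1 ≤ n := by rw [hn, hdb]; simp [runlen]
          have hmle : m ≤ a.length - i := by
            have := runlen_le_length (a.drop i) (a[i]'h.1)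
            simp only [List.length_drop] at this
            omega
          have hnle : n ≤ b.length - j := by
            have := runlen_le_length (b.drop j) (b[j]'h.2)
            simp only [List.length_drop] at this
            omega
          have hci : runEnd (a.length - i) a (a[i]'h.1) i = i + m :=
            runEnd_eq _ a _ i (by omega) (by omega)
          have hcj : runEnd (b.length - j) b (b[j]'h.2) j = j + n :=
            runEnd_eq _ b _ j (by omega) (by omega)
          rw [hci, hcj, ih (i + m) (j + n) _ (by omega)]
          have hgt := drop_runlen_gt (a.drop i) hpa _ _ hda
          have hlt := drop_runlen_lt (b.drop j) hpb _ _ hdb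
          rw [← hm] at hgt
          rw [← hn] at hlt
          have hA : a.drop i = List.replicate m (a[i]'h.1) ++ a.drop (i + m) := by
            conv_lhs => rw [← List.take_append_drop m (a.drop i)]
            rw [hm, take_runlen, List.drop_drop]
          have hB : b.drop j = List.replicate n (b[j]'h.2) ++ b.drop (j + n) := by
            conv_lhs => rw [← List.take_append_drop n (b.drop j)]
            rw [hn, take_runlen, List.drop_drop]
          have hdropA : a.drop (i + m) = (a.drop i).drop m := (List.drop_drop ..).symm
          have hdropB : b.drop (j + n) = (b.drop j).drop n := (List.drop_drop ..).symm
          calc r + ↑((i + m - i) * (j + n - j)) + pairCount (a.drop (i + m)) (b.drop (j + n)) t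
              = r + ↑(m * n) + pairCount (a.drop (i + m)) (b.drop (j + n)) t := by
                congr 2
                simp
            _ = r + pairCount (a.drop i) (b.drop j) t := by
                conv_rhs => rw [hA, hB]
                rw [pairCount_append_left, pairCount_append_right, pairCount_append_right]
                rw [pairCount_replicate m n _ _ t heq]
                have hz1 : pairCount (List.replicate m (a[i]'h.1)) (b.drop (j + n)) t = 0 := by
                  apply pairCount_eq_zero
                  intro x hx y hy
                  have hxv : x = a[i]'h.1 := List.eq_of_mem_replicate hx
                  have hyv : y < b[j]'h.2 := hlt y (by rw [hdropB] at hy; exact hy)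
                  omega
                have hz2 : pairCount (a.drop (i + m)) (List.replicate n (b[j]'h.2)) t = 0 := by
                  apply pairCount_eq_zero
                  intro x hx y hy
                  have hyv : y = b[j]'h.2 := List.eq_of_mem_replicate hy
                  have hxv : a[i]'h.1 < x := hgt x (by rw [hdropA] at hx; exact hx)
                  omega
                rw [hz1, hz2]
                ring
    · rw [dif_neg h]
      rcases Decidable.not_and_iff_not_or_not.mp h with hna | hnb
      · have hd : a.drop i = [] := List.drop_eq_nil_of_le (by omega)
        rw [hd, pairCount_nil_left]
        ring
      · have hd : b.drop j = [] := List.drop_eq_nil_of_le (by omega)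
        rw [hd]
        simp [pairCount]

theorem alt_eq_pairCount (nums1 nums2 : List Int) (t : Int) :
    twoSumCount_alt nums1 nums2 t = pairCount nums1 nums2 t := by
  unfold twoSumCount_alt
  rw [goIdx_eq _ _ _ _ (PySem.List.sorted_pairwise nums1 (fun x => x))
      (PySem.List.sorted_pairwise_rev nums2 (fun x => x)) 0 0 0 (by omega)]
  rw [List.drop_zero, List.drop_zero, zero_add]
  exact pairCount_perm _ _ _ _ _ (PySem.List.sorted_perm nums1 _ _)
    (PySem.List.sorted_perm nums2 _ _)

theorem a_eq_pairCount (nums1 nums2 : List Int) (t : Int) :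
    twoSumCount nums1 nums2 t = pairCount nums1 nums2 t := by
  unfold twoSumCount
  set hm : PySem.Dict Int Int := nums1.foldl (fun d num => d.modify (t - num) 0 (· + 1)) PySem.Dict.empty with hhm
  have hmap : ∀ v : Int, hm.getD v 0 = ((nums1.count (t - v) : Nat) : Int) := by
    intro v
    have h1 : hm = (nums1.map (fun num => t - num)).foldl
        (fun d x => d.modify x 0 (· + 1)) PySem.Dict.empty := by
      rw [hhm, List.foldl_map]
    rw [h1, PySem.Dict.getD_foldl_modify_add_one]
    have hinj : Function.Injective (fun num : Int => t - num) := by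
      intro p q hpq
      simp only at hpq
      omega
    have h2 := List.count_map_of_injective nums1 (fun num : Int => t - num) hinj (t - v)
    simp only at h2
    have h3 : t - (t - v) = v := by omega
    rw [h3] at h2
    rw [h2]
    simp
  have hstep : ∀ (racc : Int) (num : Int),
      (if hm.contains num then racc + hm.getD num 0 else racc) = racc + hm.getD num 0 := by
    intro racc num
    cases hcon : hm.contains num with
    | true => simp
    | false => rw [if_neg (by decide), PySem.Dict.getD_of_not_contains hm 0 hcon]; ring
  calc nums2.foldl (fun result num =>
          if hm.contains num then result + hm.getD num 0 else result) 0
      = nums2.foldl (fun result num => result + hm.getD num 0) 0 := by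
        apply List.foldl_ext
        intro acc x _
        exact hstep acc x
    _ = 0 + (nums2.map (fun num => hm.getD num 0)).sum :=
        PySem.List.foldl_add nums2 _ 0
    _ = pairCount nums1 nums2 t := by
        rw [zero_add]
        unfold pairCount
        congr 1
        apply List.map_congr_left
        intro y _
        exact hmap y

-- ===== VERDICT (by name: the statement is the Claim_ definition above) =====
theorem twoSumCount_spec : Claim_equal_twoSumCount := by
  intro nums1 nums2 target _
  unfold Spec_twoSumCount
  rw [a_eq_pairCount, alt_eq_pairCount]
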